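-- pv_equiv track=rewrite | github.com/kompleksanda/gutenbergs-code | lyricc/New Folder/New folder/test.py | match_vowel_cmd
-- ===== SOURCE A (Python) =====
-- use_gen_cmd = True
--
-- gen_cmd_wtp = [ ["AW"], ["AY"], ["IY","IH"], ["EY"],["OY"], ["UH","UW"], ["AE","AH","AA"] ,["AO"],["EH","ER"], ["OW"] ]
--
-- cmd_wtp = [["AE"],["AW"],["AY"],["IY"],["IH"],["EY"],["OY"],["UH"],["UW"],["AH"],["AO"],["AA"],["EH"],["OW"],["ER"]]
--
-- def match_vowel_cmd(first, second):
-- 	first = first[:len(first)-1]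
-- 	second = second[:len(second)-1]
-- 	if not(use_gen_cmd): val = cmd_wtp
-- 	else: val = gen_cmd_wtp
-- 	for values in val:
-- 		if first in values and second in values: return True
-- 	return False
-- ===== SOURCE B (Python) =====
-- use_gen_cmd = True
--
-- gen_cmd_wtp = [ ["AW"], ["AY"], ["IY","IH"], ["EY"],["OY"], ["UH","UW"], ["AE","AH","AA"] ,["AO"],["EH","ER"], ["OW"] ]
--
-- cmd_wtp = [["AE"],["AW"],["AY"],["IY"],["IH"],["EY"],["OY"],["UH"],["UW"],["AH"],["AO"],["AA"],["EH"],["OW"],["ER"]]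
--
-- # inverted index: vowel token -> group id, built once at module level
-- _gen_index = {tok: i for i, grp in enumerate(gen_cmd_wtp) for tok in grp}
-- _cmd_index = {tok: i for i, grp in enumerate(cmd_wtp) for tok in grp}
--
-- def match_vowel_cmd(first, second):
--     idx = _gen_index if use_gen_cmd else _cmd_index
--     g1 = idx.get(first[:len(first)-1])
--     g2 = idx.get(second[:len(second)-1])
--     return g1 is not None and g1 == g2
-- ===== Notes on version B (the rewrite author's own statement) =====
-- stated objective: idiomatic
-- what changed: Replaces the per-call linear scan over phoneme groups by a module-level inverted index (token -> group id) built once; the call trims both tokens, does two dict lookups and compares the ids, guarding against both lookups missing.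
import Mathlib
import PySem

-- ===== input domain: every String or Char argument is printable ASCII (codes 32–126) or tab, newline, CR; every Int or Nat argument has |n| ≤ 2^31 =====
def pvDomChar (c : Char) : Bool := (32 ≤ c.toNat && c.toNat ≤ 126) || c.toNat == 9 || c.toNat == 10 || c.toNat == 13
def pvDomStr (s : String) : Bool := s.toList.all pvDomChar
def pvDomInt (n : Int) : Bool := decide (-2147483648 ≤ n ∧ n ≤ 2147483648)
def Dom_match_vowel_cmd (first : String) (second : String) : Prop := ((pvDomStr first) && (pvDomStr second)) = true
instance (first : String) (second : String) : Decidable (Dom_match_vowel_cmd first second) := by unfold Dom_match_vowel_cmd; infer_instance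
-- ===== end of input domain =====

-- B replaces A's per-call scan over the phoneme-group table by a module-level inverted
-- index (token -> group id) built once, with two lookups and an id comparison (idiomatic).

-- ===== PORT A =====
def use_gen_cmd : Bool := true

def gen_cmd_wtp : List (List String) :=
  [["AW"], ["AY"], ["IY","IH"], ["EY"], ["OY"], ["UH","UW"], ["AE","AH","AA"], ["AO"], ["EH","ER"], ["OW"]]

def cmd_wtp : List (List String) :=
  [["AE"],["AW"],["AY"],["IY"],["IH"],["EY"],["OY"],["UH"],["UW"],["AH"],["AO"],["AA"],["EH"],["OW"],["ER"]]

-- first[:len(first)-1]  (exact Python slice semantics via PySem.List.slice)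
def pyTrim (s : String) : String :=
  String.ofList (PySem.List.slice s.toList none (some ((s.toList.length : Int) - 1)))

-- the 'for values in val: if first in values and second in values: return True' loop
def matchLoop : List (List String) → String → String → Bool
  | [], _, _ => false
  | vs :: rest, f, s => if vs.contains f && vs.contains s then true else matchLoop rest f s

def match_vowel_cmd (first : String) (second : String) : Bool :=
  let f := pyTrim first
  let s := pyTrim second
  let val := if !use_gen_cmd then cmd_wtp else gen_cmd_wtp
  matchLoop val f s

-- ===== PORT B =====
-- {tok: i for i, grp in enumerate(groups) for tok in grp}
def buildIndex (groups : List (List String)) : PySem.Dict String Int :=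
  (PySem.List.enumerate groups 0).foldl
    (fun d p => p.2.foldl (fun d tok => d.insert tok p.1) d) PySem.Dict.empty

def gen_index : PySem.Dict String Int := buildIndex gen_cmd_wtp
def cmd_index : PySem.Dict String Int := buildIndex cmd_wtp

def match_vowel_cmd_alt (first : String) (second : String) : Bool :=
  let idx := if use_gen_cmd then gen_index else cmd_index
  let g1 := idx.get? (pyTrim first)
  let g2 := idx.get? (pyTrim second)
  match g1, g2 with
  | some a, some b => a == b
  | _, _ => false

-- ===== PRECONDITION & SPEC =====
def Spec_match_vowel_cmd (first : String) (second : String) (out : Bool) : Prop := out = match_vowel_cmd_alt first second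
instance (first : String) (second : String) (out : Bool) : Decidable (Spec_match_vowel_cmd first second out) := by unfold Spec_match_vowel_cmd; infer_instance

-- ===== CLAIM (what is proved, stated in full; the proofs are below) =====
def Claim_equal_match_vowel_cmd : Prop := ∀ (first : String) (second : String), Dom_match_vowel_cmd first second → Spec_match_vowel_cmd first second (match_vowel_cmd first second)

-- ===== LEMMAS AND PROOFS =====

def tokens : List String :=
  ["AW","AY","IY","IH","EY","OY","UH","UW","AE","AH","AA","AO","EH","ER","OW"]

lemma gen_index_eq : gen_index = PySem.Dict.mk
    [("AW",0),("AY",1),("IY",2),("IH",2),("EY",3),("OY",4),("UH",5),("UW",5),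
     ("AE",6),("AH",6),("AA",6),("AO",7),("EH",8),("ER",8),("OW",9)] := by decide

lemma loop_false_left (f s : String) (hf : f ∉ tokens) : matchLoop gen_cmd_wtp f s = false := by
  simp only [tokens, List.mem_cons, List.not_mem_nil, or_false, not_or] at hf
  obtain ⟨h1,h2,h3,h4,h5,h6,h7,h8,h9,h10,h11,h12,h13,h14,h15⟩ := hf
  simp [matchLoop, gen_cmd_wtp, h1,h2,h3,h4,h5,h6,h7,h8,h9,h10,h11,h12,h13,h14,h15]

lemma loop_false_right (f s : String) (hs : s ∉ tokens) : matchLoop gen_cmd_wtp f s = false := by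
  simp only [tokens, List.mem_cons, List.not_mem_nil, or_false, not_or] at hs
  obtain ⟨h1,h2,h3,h4,h5,h6,h7,h8,h9,h10,h11,h12,h13,h14,h15⟩ := hs
  simp [matchLoop, gen_cmd_wtp, h1,h2,h3,h4,h5,h6,h7,h8,h9,h10,h11,h12,h13,h14,h15]

lemma get?_none (s : String) (hs : s ∉ tokens) : gen_index.get? s = none := by
  simp only [tokens, List.mem_cons, List.not_mem_nil, or_false, not_or] at hs
  obtain ⟨h1,h2,h3,h4,h5,h6,h7,h8,h9,h10,h11,h12,h13,h14,h15⟩ := hs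
  rw [gen_index_eq]
  simp [Ne.symm h1, Ne.symm h2, Ne.symm h3, Ne.symm h4, Ne.symm h5,
    Ne.symm h6, Ne.symm h7, Ne.symm h8, Ne.symm h9, Ne.symm h10, Ne.symm h11, Ne.symm h12,
    Ne.symm h13, Ne.symm h14, Ne.symm h15, PySem.Dict.get?]

lemma core (f s : String) :
    matchLoop gen_cmd_wtp f s =
      (match gen_index.get? f, gen_index.get? s with
       | some a, some b => a == b
       | _, _ => false) := by
  by_cases hf : f ∈ tokens
  · by_cases hs : s ∈ tokens
    · simp only [tokens, List.mem_cons, List.not_mem_nil, or_false] at hf hs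
      rcases hf with rfl|rfl|rfl|rfl|rfl|rfl|rfl|rfl|rfl|rfl|rfl|rfl|rfl|rfl|rfl <;>
        rcases hs with rfl|rfl|rfl|rfl|rfl|rfl|rfl|rfl|rfl|rfl|rfl|rfl|rfl|rfl|rfl <;> decide
    · rw [loop_false_right f s hs, get?_none s hs]
      cases gen_index.get? f <;> rfl
  · rw [loop_false_left f s hf, get?_none f hf]

-- ===== VERDICT (by name: the statement is the Claim_ definition above) =====
theorem match_vowel_cmd_spec : Claim_equal_match_vowel_cmd := by
  intro first second _
  unfold Spec_match_vowel_cmd match_vowel_cmd match_vowel_cmd_alt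
  simp only [use_gen_cmd, Bool.not_true, if_true, if_false, Bool.false_eq_true]
  exact core (pyTrim first) (pyTrim second)
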